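-- pv_equiv track=rewrite | github.com/enigm4tik/advent-of-code | 2016/day04.py | get_most_used_letters
-- ===== SOURCE A (Python) =====
-- def get_most_used_letters(code):
--     list_of_used_letters = []
--     amount_of_letters = {}
--     letters = code.split('-')[:-1]
--     for word in letters:
--         for letter in word:
--             if not letter in list_of_used_letters:
--                 list_of_used_letters.append(letter)
--                 amount_of_letters[letter] = 1
--             else:
--                 amount_of_letters[letter] += 1
--     return amount_of_letters, list_of_used_letters
-- ===== SOURCE B (Python) =====
-- def get_most_used_letters(code):
--     chars = list(''.join(code.split('-')[:-1]))
--     order = list(dict.fromkeys(chars))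
--     return {c: chars.count(c) for c in order}, order
-- ===== Notes on version B (the rewrite author's own statement) =====
-- stated objective: alternative
-- what changed: Replaces A's single incremental pass (first-seen list with membership test plus a running count dict) by two staged passes: the first-seen order is read off a dict.fromkeys dedup, and each distinct letter's count is then obtained by a separate chars.count scan instead of any running counter.
import Mathlib
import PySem

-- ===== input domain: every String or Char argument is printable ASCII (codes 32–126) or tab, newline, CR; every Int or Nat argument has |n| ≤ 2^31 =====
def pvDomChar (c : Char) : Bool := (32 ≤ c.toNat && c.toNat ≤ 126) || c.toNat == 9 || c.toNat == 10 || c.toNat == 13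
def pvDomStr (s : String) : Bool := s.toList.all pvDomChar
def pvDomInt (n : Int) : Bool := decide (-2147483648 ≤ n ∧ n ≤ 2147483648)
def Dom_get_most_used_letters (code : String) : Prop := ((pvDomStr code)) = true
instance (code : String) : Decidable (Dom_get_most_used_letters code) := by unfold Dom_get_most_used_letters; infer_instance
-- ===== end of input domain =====

-- B stages the work: first the first-seen order via a dict.fromkeys dedup, then one
-- count scan per distinct letter — no incremental counter (objective: alternative).

-- ===== PORT A =====
-- literal port: nested loops, a first-seen list, and an if/else membership branch;
-- `amount_of_letters[letter] += 1` is ported as insert letter (getD letter 0 + 1): the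
-- else branch only runs when letter is already a key, so the default 0 is never used.
def get_most_used_letters (code : String) : (List (String × Int)) × List String :=
  let letters := PySem.List.slice ((PySem.Str.split? code "-").getD []) none (some (-1))
  let st := letters.foldl (fun st word =>
      (word.toList.map (fun c => String.ofList [c])).foldl (fun st letter =>
        if st.1.contains letter = false then
          (st.1 ++ [letter], st.2.insert letter 1)
        else
          (st.1, st.2.insert letter (st.2.getD letter 0 + 1))) st)
    (([] : List String), (PySem.Dict.empty : PySem.Dict String Int))
  (st.2.items, st.1)

-- ===== PORT B =====
-- chars = list(''.join(...)); order = list(dict.fromkeys(chars)) is PySem.List.dedup;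
-- the dict comprehension {c: chars.count(c) for c in order} is a fold of inserts.
def get_most_used_letters_alt (code : String) : (List (String × Int)) × List String :=
  let chars := (PySem.Str.join "" (PySem.List.slice ((PySem.Str.split? code "-").getD []) none (some (-1)))).toList.map
      (fun c => String.ofList [c])
  let order := PySem.List.dedup chars
  let counts := order.foldl (fun d c => d.insert c ((PySem.List.count chars c : Int)))
      (PySem.Dict.empty : PySem.Dict String Int)
  (counts.items, order)

-- ===== PRECONDITION & SPEC =====
def Spec_get_most_used_letters (code : String) (out : (List (String × Int)) × List String) : Prop := out = get_most_used_letters_alt code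
instance (code : String) (out : (List (String × Int)) × List String) : Decidable (Spec_get_most_used_letters code out) := by unfold Spec_get_most_used_letters; infer_instance

-- ===== CLAIM (what is proved, stated in full; the proofs are below) =====
def Claim_equal_get_most_used_letters : Prop := ∀ (code : String), Dom_get_most_used_letters code → Spec_get_most_used_letters code (get_most_used_letters code)

-- ===== LEMMAS AND PROOFS =====

-- ''.join(parts) concatenates the parts
theorem pv_join_nil_sep (ls : List (List Char)) :
    PySem.Chars.join [] ls = ls.flatten := by
  induction ls with
  | nil => simp [PySem.Chars.join_nil]
  | cons p rest ih =>
    cases rest with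
    | nil => simp [PySem.Chars.join, List.intercalate]
    | cons q rs => simp [PySem.Chars.join_cons_cons] at ih ⊢; simp [ih]

-- the characters of ''.join(words), as 1-char strings, are the flattened letters
theorem pv_joined_chars (ws : List String) :
    ((PySem.Str.join "" ws).toList.map (fun c => String.ofList [c])) =
      ws.flatMap (fun w => w.toList.map (fun c => String.ofList [c])) := by
  rw [PySem.Str.toList_join]
  show (PySem.Chars.join [] (ws.map String.toList)).map _ = _
  rw [pv_join_nil_sep, List.map_flatten, List.flatMap_def, List.map_map]
  rfl

-- A's word-by-word nested fold is the fold over the flattened letters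
theorem pv_nested_eq_flat {σ : Type} (step : σ → String → σ)
    (ws : List String) (st : σ) :
    ws.foldl (fun st w => (w.toList.map (fun c => String.ofList [c])).foldl step st) st =
      (ws.flatMap (fun w => w.toList.map (fun c => String.ofList [c]))).foldl step st := by
  induction ws generalizing st with
  | nil => rfl
  | cons w ws ih => simp [List.flatMap_cons, List.foldl_append, ih]

-- loop invariant: A's first-seen list is exactly the key list of the counting dict,
-- and A's if/else loop builds the unconditional counting-dict fold
theorem pv_inv (l : List String) (d : PySem.Dict String Int) :
    l.foldl (fun st letter =>
        if st.1.contains letter = false then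
          (st.1 ++ [letter], st.2.insert letter 1)
        else
          (st.1, st.2.insert letter (st.2.getD letter 0 + 1))) (d.keys, d) =
      ((l.foldl (fun d letter => d.insert letter (d.getD letter 0 + 1)) d).keys,
        l.foldl (fun d letter => d.insert letter (d.getD letter 0 + 1)) d) := by
  induction l generalizing d with
  | nil => rfl
  | cons c l ih =>
    have hmem : d.keys.contains c = d.contains c := by
      rw [PySem.Dict.contains_eq_decide_mem_keys, List.contains_eq_mem]
    by_cases h : d.contains c = true
    · have hkeys := PySem.Dict.keys_insert_of_contains d (d.getD c 0 + 1) h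
      simp only [List.foldl_cons, hmem, h, Bool.true_eq_false, if_false]
      rw [← hkeys, ih]
    · have h' : d.contains c = false := by simpa using h
      have hkeys := PySem.Dict.keys_insert_of_not_contains d (1 : Int) h'
      have hget := PySem.Dict.getD_of_not_contains d (0 : Int) h'
      simp only [List.foldl_cons, hmem, h', if_true, hget]
      rw [← hkeys, ih]
      norm_num

-- B's staged dict comprehension over the deduped order has the counter's items
theorem pv_b_items (chars : List String) :
    ((PySem.List.dedup chars).foldl
        (fun d c => d.insert c ((PySem.List.count chars c : Int)))
        (PySem.Dict.empty : PySem.Dict String Int)).items =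
      (PySem.List.dedup chars).map (fun c => (c, (chars.count c : Int))) := by
  have h := PySem.Dict.items_foldl_insert_fresh (PySem.List.dedup chars) (fun c => c)
      (fun c => ((PySem.List.count chars c : Int))) PySem.Dict.empty
      (fun a _ => PySem.Dict.contains_empty a)
      (by simpa using PySem.List.nodup_dedup chars)
  simp [PySem.List.count_eq] at h; exact h

-- ===== VERDICT (by name: the statement is the Claim_ definition above) =====
theorem get_most_used_letters_spec : Claim_equal_get_most_used_letters := by
  intro code _
  show _ = _
  unfold get_most_used_letters get_most_used_letters_alt
  dsimp only
  rw [pv_joined_chars, pv_nested_eq_flat, pv_b_items]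
  have hA := pv_inv
    ((PySem.List.slice ((PySem.Str.split? code "-").getD []) none (some (-1))).flatMap
      (fun w => w.toList.map (fun c => String.ofList [c])))
    (PySem.Dict.empty : PySem.Dict String Int)
  rw [PySem.Dict.keys_empty] at hA
  rw [hA, PySem.Dict.foldl_insert_getD_add_one_eq_counter,
     PySem.Dict.items_counter, PySem.Dict.keys_counter]
  simp [PySem.List.dedup_eq_ofList]
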